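-- pv_equiv track=rewrite | github.com/markyb2833/Drivetestv2 | hdsentinel_integration.py | _parse_drive_list
-- ===== SOURCE A (Python) =====
-- from typing import Dict, Optional, List
--
-- def _parse_drive_list(output: str) -> List[Dict]:
--     """Parse list of all drives"""
--     drives = []
--     lines = output.split('\n')
--
--     current_drive = {}
--     for line in lines:
--         if not line.strip():
--             if current_drive:
--                 drives.append(current_drive)
--                 current_drive = {}
--             continue
--
--         # Parse drive information
--         if ':' in line:
--             key, value = line.split(':', 1)
--             current_drive[key.strip().lower()] = value.strip()
--
--     if current_drive:
--         drives.append(current_drive)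
--
--     return drives
-- ===== SOURCE B (Python) =====
-- from typing import Dict, List
--
--
-- def _parse_drive_list(output: str) -> List[Dict]:
--     """Parse list of all drives: split lines into blank-separated blocks, then parse each block."""
--     lines = output.split('\n')
--     n = len(lines)
--
--     # Phase 1: scan by index, collecting each maximal run of non-blank lines as a block.
--     blocks = []
--     i = 0
--     while i < n:
--         if not lines[i].strip():
--             i += 1
--         else:
--             j = i + 1
--             while j < n and lines[j].strip():
--                 j += 1
--             blocks.append(lines[i:j])
--             i = j
--
--     # Phase 2: extract the (key, value) pair of a line, if any.
--     def pair(line):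
--         if ':' in line:
--             key, value = line.split(':', 1)
--             return (key.strip().lower(), value.strip())
--         return None
--
--     # Phase 3: each block becomes the dict of its pairs; keep the non-empty ones.
--     dicts = (dict(p for p in map(pair, blk) if p is not None) for blk in blocks)
--     return [d for d in dicts if d]
-- ===== Notes on version B (the rewrite author's own statement) =====
-- stated objective: alternative
-- what changed: Replaces A's single pass with an inline-flushing dict accumulator by a three-phase pipeline: an index scan cuts the lines into blank-separated blocks, a per-line pair extractor turns each block into a list of (key, value) pairs fed to dict(), and empty dicts are filtered out at the end.
import Mathlib
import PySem

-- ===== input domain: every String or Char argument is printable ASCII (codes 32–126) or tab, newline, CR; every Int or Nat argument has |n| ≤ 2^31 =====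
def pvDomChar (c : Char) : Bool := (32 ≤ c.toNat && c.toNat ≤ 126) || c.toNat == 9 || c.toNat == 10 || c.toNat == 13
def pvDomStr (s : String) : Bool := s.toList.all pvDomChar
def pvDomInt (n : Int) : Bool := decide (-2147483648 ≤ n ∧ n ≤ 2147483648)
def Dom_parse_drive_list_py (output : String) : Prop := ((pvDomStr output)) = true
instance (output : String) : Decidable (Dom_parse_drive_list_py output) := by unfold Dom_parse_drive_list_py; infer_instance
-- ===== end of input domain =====

-- B re-implements A as a three-phase pipeline (cut the lines into blank-separated blocks,
-- turn each block's ':'-lines into pairs fed to a dict, drop empty dicts);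
-- objective: alternative, same O(n) cost.

-- ===== PORT A =====
-- A's loop body: state = (drives so far, current_drive); blank line flushes, ':'-line inserts.
def pdlStepA (st : List (PySem.Dict String String) × PySem.Dict String String) (line : String) :
    List (PySem.Dict String String) × PySem.Dict String String :=
  if PySem.Str.strip line = "" then
    (if st.2.items.isEmpty then st else (st.1 ++ [st.2], PySem.Dict.empty))
  else if PySem.Str.isIn ":" line then
    match PySem.Str.splitMax? line ":" 1 with
    | some (key :: value :: _) =>
        (st.1, st.2.insert (PySem.Str.lower (PySem.Str.strip key)) (PySem.Str.strip value))
    | _ => st          -- unreachable: ':' ∈ line guarantees two pieces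
  else st

def parse_drive_list_py (output : String) : List (List (String × String)) :=
  let lines := (PySem.Str.split? output "\n").getD []   -- sep "\n" ≠ "": split? is always some
  let st := lines.foldl pdlStepA ([], PySem.Dict.empty)
  (if st.2.items.isEmpty then st.1 else st.1 ++ [st.2]).map (fun d => d.items)

-- ===== PORT B =====
-- B phase 1: the index scan "while i < n: skip blanks / collect lines[i:j]" — the obvious
-- structural recursion on the remaining suffix of the line list.
def pdlNonBlank (line : String) : Bool := !(PySem.Str.strip line == "")

def pdlBlocks (lines : List String) : List (List String) :=
  match lines with
  | [] => []
  | l :: ls =>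
    if pdlNonBlank l then
      (l :: ls.takeWhile pdlNonBlank) :: pdlBlocks (ls.dropWhile pdlNonBlank)
    else
      pdlBlocks ls
termination_by lines.length
decreasing_by
  · have := (ls.dropWhile_sublist pdlNonBlank).length_le
    simp only [List.length_cons]; omega
  · simp only [List.length_cons]; omega

-- B phase 2: the (key, value) pair of a line, if any
def pdlPair? (line : String) : Option (String × String) :=
  if PySem.Str.isIn ":" line then
    match PySem.Str.splitMax? line ":" 1 with
    | some (key :: value :: _) =>
        some (PySem.Str.lower (PySem.Str.strip key), PySem.Str.strip value)
    | _ => none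
  else none

-- B phase 3: dict(pairs of a block)
def pdlDict (blk : List String) : PySem.Dict String String :=
  (blk.filterMap pdlPair?).foldl (fun d p => d.insert p.1 p.2) PySem.Dict.empty

def parse_drive_list_py_alt (output : String) : List (List (String × String)) :=
  let blocks := pdlBlocks ((PySem.Str.split? output "\n").getD [])
  ((blocks.map pdlDict).map (fun d => d.items)).filter (fun its => !its.isEmpty)

-- ===== PRECONDITION & SPEC =====
def Spec_parse_drive_list_py (output : String) (out : List (List (String × String))) : Prop := out = parse_drive_list_py_alt output
instance (output : String) (out : List (List (String × String))) : Decidable (Spec_parse_drive_list_py output out) := by unfold Spec_parse_drive_list_py; infer_instance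

-- ===== CLAIM (what is proved, stated in full; the proofs are below) =====
def Claim_equal_parse_drive_list_py : Prop := ∀ (output : String), Dom_parse_drive_list_py output → Spec_parse_drive_list_py output (parse_drive_list_py output)

-- ===== LEMMAS AND PROOFS =====

-- A's non-blank step is "apply the pair of the line, if any"
def pdlIns (d : PySem.Dict String String) (line : String) : PySem.Dict String String :=
  match pdlPair? line with
  | some p => d.insert p.1 p.2
  | none => d

lemma pdlStepA_nonblank (ds : List (PySem.Dict String String)) (d : PySem.Dict String String)
    (line : String) (h : ¬ PySem.Str.strip line = "") :
    pdlStepA (ds, d) line = (ds, pdlIns d line) := by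
  simp only [pdlStepA, pdlIns, pdlPair?, h, if_false]
  split
  · split <;> rfl
  · rfl

lemma pdlStepA_blank_empty (ds : List (PySem.Dict String String)) (line : String)
    (h : PySem.Str.strip line = "") :
    pdlStepA (ds, PySem.Dict.empty) line = (ds, PySem.Dict.empty) := by
  simp [pdlStepA, h, PySem.Dict.empty]

lemma pdlDict_eq_foldl (blk : List String) :
    pdlDict blk = blk.foldl pdlIns PySem.Dict.empty := by
  have key : ∀ (bs : List String) (d : PySem.Dict String String),
      (bs.filterMap pdlPair?).foldl (fun d p => d.insert p.1 p.2) d = bs.foldl pdlIns d := by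
    intro bs
    induction bs with
    | nil => intro d; rfl
    | cons b bs ih =>
        intro d
        cases hp : pdlPair? b with
        | none => simp [hp, pdlIns, ih]
        | some p => simp [hp, pdlIns, ih]
  exact key blk PySem.Dict.empty

-- folding a run of non-blank lines just folds pdlIns into the current dict
lemma pdl_fold_run (t : List String) :
    ∀ (ds : List (PySem.Dict String String)) (d : PySem.Dict String String),
    (∀ x ∈ t, ¬ PySem.Str.strip x = "") →
    t.foldl pdlStepA (ds, d) = (ds, t.foldl pdlIns d) := by
  induction t with
  | nil => intro ds d _; rfl
  | cons x t ih =>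
      intro ds d h
      rw [List.foldl_cons, List.foldl_cons,
        pdlStepA_nonblank ds d x (h x (by simp))]
      exact ih ds _ (fun y hy => h y (by simp [hy]))

lemma pdl_dropWhile_head (p : String → Bool) :
    ∀ (ls : List String) (b : String) (r : List String),
    ls.dropWhile p = b :: r → p b = false := by
  intro ls
  induction ls with
  | nil => intro b r h; simp [List.dropWhile] at h
  | cons x ls ih =>
      intro b r h
      by_cases hx : p x
      · rw [List.dropWhile_cons_of_pos hx] at h; exact ih b r h
      · rw [List.dropWhile_cons_of_neg hx] at h
        cases h; simpa using hx

-- A's finishing step and B's tail pipeline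
def pdlFinA (st : List (PySem.Dict String String) × PySem.Dict String String) :
    List (List (String × String)) :=
  (if st.2.items.isEmpty then st.1 else st.1 ++ [st.2]).map (fun d => d.items)

def pdlFinB (bs : List (List String)) : List (List (String × String)) :=
  ((bs.map pdlDict).map (fun d => d.items)).filter (fun its => !its.isEmpty)

lemma pdl_main (lines : List String) :
    ∀ (ds : List (PySem.Dict String String)),
    pdlFinA (lines.foldl pdlStepA (ds, PySem.Dict.empty)) =
      ds.map (fun d => d.items) ++ pdlFinB (pdlBlocks lines) := by
  induction lines using pdlBlocks.induct with
  | case1 =>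
      intro ds
      simp [pdlFinA, pdlFinB, pdlBlocks, PySem.Dict.empty]
  | case2 l ls hl ih =>
      intro ds
      have hln : ¬ PySem.Str.strip l = "" := by
        simpa [pdlNonBlank] using hl
      have hsplit : ls = ls.takeWhile pdlNonBlank ++ ls.dropWhile pdlNonBlank :=
        (List.takeWhile_append_dropWhile (p := pdlNonBlank) (l := ls)).symm
      have hrun : ∀ x ∈ ls.takeWhile pdlNonBlank, ¬ PySem.Str.strip x = "" := by
        intro x hx
        have := List.mem_takeWhile_imp hx
        simpa [pdlNonBlank] using this
      set t := ls.takeWhile pdlNonBlank with ht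
      set r := ls.dropWhile pdlNonBlank with hr
      have hD : (l :: t).foldl pdlIns PySem.Dict.empty = pdlDict (l :: t) :=
        (pdlDict_eq_foldl _).symm
      have step1 : (l :: ls).foldl pdlStepA (ds, PySem.Dict.empty)
          = r.foldl pdlStepA (ds, pdlDict (l :: t)) := by
        conv_lhs => rw [show l :: ls = (l :: t) ++ r by rw [List.cons_append, ← hsplit]]
        rw [List.foldl_append,
          pdl_fold_run (l :: t) ds PySem.Dict.empty
            (by intro x hx; rcases List.mem_cons.mp hx with h | h
                · exact h ▸ hln
                · exact hrun x h),
          hD]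
      rw [step1]
      have hBcons : pdlBlocks (l :: ls) = (l :: t) :: pdlBlocks r := by
        rw [pdlBlocks]; simp only [hl, if_true, ← ht, ← hr]
      rw [hBcons]
      have hFinBcons : pdlFinB ((l :: t) :: pdlBlocks r) =
          (if (pdlDict (l :: t)).items.isEmpty then [] else [(pdlDict (l :: t)).items]) ++
            pdlFinB (pdlBlocks r) := by
        simp only [pdlFinB, List.map_cons, List.filter_cons]
        by_cases he : (pdlDict (l :: t)).items.isEmpty <;> simp [he]
      rw [hFinBcons]
      cases hrcase : r with
      | nil =>
          simp only [List.foldl_nil, pdlFinA]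
          by_cases he : (pdlDict (l :: t)).items.isEmpty <;>
            simp [he, pdlFinB, pdlBlocks]
      | cons b r' =>
          have hb : PySem.Str.strip b = "" := by
            have := pdl_dropWhile_head pdlNonBlank ls b r' (hr ▸ hrcase)
            simpa [pdlNonBlank] using this
          -- the flushed drives list
          set ds' := if (pdlDict (l :: t)).items.isEmpty then ds else ds ++ [pdlDict (l :: t)]
            with hds'
          have hstep : pdlStepA (ds, pdlDict (l :: t)) b = (ds', PySem.Dict.empty) := by
            simp only [pdlStepA, hb, if_true, hds']
            by_cases he : (pdlDict (l :: t)).items.isEmpty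
            · simp only [he, if_true]
              exact Prod.ext rfl (PySem.Dict.ext (by simpa [List.isEmpty_iff] using he))
            · simp [he]
          have hskip : (b :: r').foldl pdlStepA (ds', PySem.Dict.empty)
              = r'.foldl pdlStepA (ds', PySem.Dict.empty) := by
            rw [List.foldl_cons, pdlStepA_blank_empty ds' b hb]
          calc pdlFinA ((b :: r').foldl pdlStepA (ds, pdlDict (l :: t)))
              = pdlFinA (r'.foldl pdlStepA (ds', PySem.Dict.empty)) := by
                rw [List.foldl_cons, hstep]
            _ = pdlFinA ((b :: r').foldl pdlStepA (ds', PySem.Dict.empty)) := by rw [hskip]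
            _ = ds'.map (fun d => d.items) ++ pdlFinB (pdlBlocks (b :: r')) := by
                have := ih ds'
                rw [hrcase] at this
                exact this
            _ = ds.map (fun d => d.items) ++
                  ((if (pdlDict (l :: t)).items.isEmpty then [] else [(pdlDict (l :: t)).items]) ++
                    pdlFinB (pdlBlocks (b :: r'))) := by
                by_cases he : (pdlDict (l :: t)).items.isEmpty <;> simp [hds', he]
  | case3 l ls hl ih =>
      intro ds
      have hb : PySem.Str.strip l = "" := by
        simpa [pdlNonBlank] using hl
      rw [List.foldl_cons, pdlStepA_blank_empty ds l hb]
      have hB : pdlBlocks (l :: ls) = pdlBlocks ls := by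
        rw [pdlBlocks]; simp [hl]
      rw [hB]; exact ih ds

-- ===== VERDICT (by name: the statement is the Claim_ definition above) =====
theorem parse_drive_list_py_spec : Claim_equal_parse_drive_list_py := by
  intro output _
  show parse_drive_list_py output = parse_drive_list_py_alt output
  have := pdl_main ((PySem.Str.split? output "\n").getD []) []
  simpa [parse_drive_list_py, parse_drive_list_py_alt, pdlFinA, pdlFinB] using this
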